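-- pv_equiv track=rewrite | github.com/kkilian/opening-books | Util.py | accept
-- ===== SOURCE A (Python) =====
-- def accept(opening_book, board_state):
--     opening = board_state.split(' ')
--     cd = {}
--
--     for L, R in opening_book.items():
--         L = L.split(' ')
--         for i in range(1, len(L) + 1):
--             p = L[:i]
--             s = L[i:]
--
--             if opening == p:
--                 if len(s) > 0:
--                     cd[s[0]] = opening[0]
--
--     if len(cd) != 0:
--         return True, cd
--     else:
--         return False, None
-- ===== SOURCE B (Python) =====
-- def accept(opening_book, board_state):
--     # A key's space-split list extends opening = board_state.split(' ') by at least
--     # one token  iff  the key literally starts with board_state + ' '  (split on a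
--     # single-char separator is join-invertible), and the continuation token is the
--     # first space-split piece of the remainder.
--     prefix = board_state + ' '
--     head = board_state.split(' ')[0]
--     cd = {key[len(prefix):].split(' ')[0]: head
--           for key in opening_book if key.startswith(prefix)}
--     if cd:
--         return True, cd
--     return False, None
-- ===== Notes on version B (the rewrite author's own statement) =====
-- stated objective: faster
-- what changed: B replaces A's per-key token split and loop over every prefix length with a single string startswith test against board_state+' ' and reads the continuation token from the key's tail, collecting matches in one dict comprehension.
import Mathlib
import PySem

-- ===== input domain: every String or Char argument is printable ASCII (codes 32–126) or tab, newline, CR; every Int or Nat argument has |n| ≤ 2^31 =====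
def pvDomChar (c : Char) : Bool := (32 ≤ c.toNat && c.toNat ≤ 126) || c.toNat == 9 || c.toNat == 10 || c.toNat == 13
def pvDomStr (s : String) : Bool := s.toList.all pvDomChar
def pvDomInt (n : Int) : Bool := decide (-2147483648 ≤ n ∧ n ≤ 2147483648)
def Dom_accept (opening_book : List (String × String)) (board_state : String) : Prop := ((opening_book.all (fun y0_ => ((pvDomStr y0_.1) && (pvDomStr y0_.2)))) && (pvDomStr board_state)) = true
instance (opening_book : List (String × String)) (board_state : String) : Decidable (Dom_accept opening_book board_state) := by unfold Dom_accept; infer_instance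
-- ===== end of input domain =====

-- B replaces A's split-every-key-and-try-every-prefix-length loop with one string
-- startswith test per key (against board_state + ' '), an asymptotically faster exact
-- re-implementation.


-- ===== PORT A =====
-- board_state.split(' '): the separator is the nonempty literal " ", so split? is always `some`
-- and the `getD []` default is never taken; likewise s[0] / opening[0] are only evaluated under
-- guards that put the index in range, so pyGetD's default is never taken.
def accept (opening_book : List (String × String)) (board_state : String) : Bool × (Option (List (String × String))) :=
  let opening := (PySem.Str.split? board_state " ").getD []
  let cd : PySem.Dict String String := opening_book.foldl (fun cd LR =>
    let L := (PySem.Str.split? LR.1 " ").getD []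
    (PySem.List.pyRange 1 ((L.length : Int) + 1) 1).foldl (fun cd i =>
      let p := PySem.List.slice L none (some i)
      let s := PySem.List.slice L (some i) none
      if opening = p then
        if s.length > 0 then cd.insert (PySem.List.pyGetD s 0 "") (PySem.List.pyGetD opening 0 "") else cd
      else cd) cd) PySem.Dict.empty
  if cd.size ≠ 0 then (true, some cd.items) else (false, none)

-- ===== PORT B =====
-- Ported at the List Char level: split(' ') on the nonempty single-char separator is
-- PySem.Chars.splitOn · [' '] (exact); key[len(prefix):] is List.drop pre.length (the slice
-- bound is a nonnegative length, so Python's slice = drop, exact); [0] on a split result is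
-- pyGetD · 0 [] (split always yields ≥ 1 piece, the default is never taken).
def accept_alt (opening_book : List (String × String)) (board_state : String) : Bool × (Option (List (String × String))) :=
  let pre : List Char := board_state.toList ++ [' ']
  let head : String := String.ofList (PySem.List.pyGetD (PySem.Chars.splitOn board_state.toList [' ']) 0 [])
  let entries : List (String × String) := opening_book.filterMap (fun kv =>
    if PySem.Chars.startswith kv.1.toList pre then
      some (String.ofList (PySem.List.pyGetD (PySem.Chars.splitOn (kv.1.toList.drop pre.length) [' ']) 0 []), head)
    else none)
  let cd : PySem.Dict String String := entries.foldl (fun d p => d.insert p.1 p.2) PySem.Dict.empty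
  if cd.size ≠ 0 then (true, some cd.items) else (false, none)

-- ===== PRECONDITION & SPEC =====
def Spec_accept (opening_book : List (String × String)) (board_state : String) (out : Bool × (Option (List (String × String)))) : Prop := out = accept_alt opening_book board_state
instance (opening_book : List (String × String)) (board_state : String) (out : Bool × (Option (List (String × String)))) : Decidable (Spec_accept opening_book board_state out) := by unfold Spec_accept; infer_instance

-- ===== CLAIM (what is proved, stated in full; the proofs are below) =====
def Claim_equal_accept : Prop := ∀ (opening_book : List (String × String)) (board_state : String), Dom_accept opening_book board_state → Spec_accept opening_book board_state (accept opening_book board_state)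

-- ===== LEMMAS AND PROOFS =====

-- a simple structural model of split-on-a-single-space
def pvSp : List Char → List (List Char)
  | [] => [[]]
  | c :: rest => if c = ' ' then [] :: pvSp rest else (pvSp rest).modifyHead (c :: ·)

theorem pvSp_ne_nil : ∀ (l : List Char), pvSp l ≠ []
  | [] => by simp [pvSp]
  | c :: rest => by
      simp only [pvSp]
      split
      · simp
      · cases h : pvSp rest with
        | nil => exact absurd h (pvSp_ne_nil rest)
        | cons a t => simp [List.modifyHead]

theorem pv_go_eq : ∀ (fuel : Nat) (l cur : List Char) (acc : List (List Char)), l.length ≤ fuel →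
    PySem.Chars.splitOn.go [' '] fuel l cur acc = acc.reverse ++ (pvSp l).modifyHead (cur.reverse ++ ·)
  | fuel, [], cur, acc, _ => by
      cases fuel <;> simp [PySem.Chars.splitOn.go, pvSp, List.modifyHead]
  | fuel+1, c :: rest, cur, acc, h => by
      rw [PySem.Chars.splitOn.go]
      by_cases hc : c = ' '
      · subst hc
        rw [if_pos (by simp [List.isPrefixOf])]
        rw [pv_go_eq fuel _ _ _ (by simpa using h)]
        rw [show pvSp (' ' :: rest) = [] :: pvSp rest from by simp [pvSp]]
        cases h : pvSp rest <;> simp [List.modifyHead, h]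
      · rw [if_neg (by simp [List.isPrefixOf]; intro h'; exact hc h'.symm)]
        rw [pv_go_eq fuel _ _ _ (by simpa using h)]
        simp only [pvSp, if_neg hc]
        cases hsp : pvSp rest with
        | nil => exact absurd hsp (pvSp_ne_nil rest)
        | cons a t => simp [List.modifyHead]

theorem pv_splitOn_eq (l : List Char) : PySem.Chars.splitOn l [' '] = pvSp l := by
  rw [PySem.Chars.splitOn, pv_go_eq _ _ _ _ (by omega)]
  cases h : pvSp l with
  | nil => exact absurd h (pvSp_ne_nil l)
  | cons a t => simp [List.modifyHead]

theorem pvSp_append : ∀ (a b : List Char), pvSp (a ++ ' ' :: b) = pvSp a ++ pvSp b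
  | [], b => by simp [pvSp]
  | c :: rest, b => by
      by_cases hc : c = ' '
      · subst hc; simp [pvSp, pvSp_append rest b]
      · simp only [List.cons_append, pvSp, if_neg hc, pvSp_append rest b]
        cases h : pvSp rest with
        | nil => exact absurd h (pvSp_ne_nil rest)
        | cons x t => simp [List.modifyHead]

theorem pv_join_sp : ∀ (l : List Char), PySem.Chars.join [' '] (pvSp l) = l
  | [] => by simp [pvSp, PySem.Chars.join_singleton]
  | c :: rest => by
      by_cases hc : c = ' '
      · subst hc
        rw [show pvSp (' ' :: rest) = [] :: pvSp rest from by simp [pvSp]]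
        cases h : pvSp rest with
        | nil => exact absurd h (pvSp_ne_nil rest)
        | cons a t =>
            rw [PySem.Chars.join_cons_cons]
            have := pv_join_sp rest
            rw [h] at this
            simp [this]
      · simp only [pvSp, if_neg hc]
        cases h : pvSp rest with
        | nil => exact absurd h (pvSp_ne_nil rest)
        | cons a t =>
            have := pv_join_sp rest
            rw [h] at this
            cases t with
            | nil => simp [List.modifyHead, PySem.Chars.join_singleton] at this ⊢; simp [this]
            | cons b t' =>
                simp only [List.modifyHead, PySem.Chars.join_cons_cons] at this ⊢
                simp [this]

theorem pv_join_append : ∀ (a b : List (List Char)), a ≠ [] → b ≠ [] →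
    PySem.Chars.join [' '] (a ++ b) = PySem.Chars.join [' '] a ++ ' ' :: PySem.Chars.join [' '] b
  | [], _, ha, _ => absurd rfl ha
  | [_], [], _, hb => absurd rfl hb
  | [x], y :: ys, _, _ => by
      rw [List.singleton_append, PySem.Chars.join_cons_cons, PySem.Chars.join_singleton]
      simp
  | x :: x' :: xs', b, _, hb => by
      have ih := pv_join_append (x' :: xs') b (by simp) hb
      rw [List.cons_append] at ih
      rw [List.cons_append, List.cons_append, PySem.Chars.join_cons_cons, ih,
          PySem.Chars.join_cons_cons]
      simp

-- the key condition of A (split-list prefix of one more token) is B's string startswith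
theorem pv_cond_iff (b k : List Char) :
    ((pvSp b).length < (pvSp k).length ∧ (pvSp k).take (pvSp b).length = pvSp b) ↔ (b ++ [' ']) <+: k := by
  constructor
  · rintro ⟨hlen, htake⟩
    have hk : pvSp k = pvSp b ++ (pvSp k).drop (pvSp b).length := by
      conv_lhs => rw [← List.take_append_drop (pvSp b).length (pvSp k)]
      rw [htake]
    have hd : (pvSp k).drop (pvSp b).length ≠ [] := by
      intro h; rw [List.drop_eq_nil_iff] at h; omega
    have := pv_join_sp k
    rw [hk, pv_join_append _ _ (pvSp_ne_nil b) hd, pv_join_sp b] at this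
    refine ⟨PySem.Chars.join [' '] ((pvSp k).drop (pvSp b).length), ?_⟩
    simpa using this
  · rintro ⟨rest, hrest⟩
    have hk : k = b ++ ' ' :: rest := by rw [← hrest]; simp
    rw [hk, pvSp_append]
    constructor
    · have := pvSp_ne_nil rest
      have : 0 < (pvSp rest).length := List.length_pos_iff.mpr this
      simp; omega
    · simp

-- a fold whose step fixes every state is the identity
theorem pv_foldl_id {α β : Type} (l : List β) (f : α → β → α) (h : ∀ c, ∀ i ∈ l, f c i = c) (c : α) : l.foldl f c = c := by
  induction l generalizing c with
  | nil => rfl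
  | cons x xs ih =>
      simp only [List.foldl_cons, h c x (by simp)]
      exact ih (fun c i hi => h c i (List.mem_cons_of_mem _ hi)) c

-- the inner loop of A over all prefix lengths equals a single prefix test at i = len(opening)
theorem pv_inner_eq (opening L : List String) (hop : opening ≠ []) (cd : PySem.Dict String String) :
    (PySem.List.pyRange 1 ((L.length : Int) + 1) 1).foldl (fun cd i =>
      let p := PySem.List.slice L none (some i)
      let s := PySem.List.slice L (some i) none
      if opening = p then
        if s.length > 0 then cd.insert (PySem.List.pyGetD s 0 "") (PySem.List.pyGetD opening 0 "") else cd
      else cd) cd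
    = if L.length > opening.length ∧ PySem.List.slice L none (some (opening.length : Int)) = opening then
        cd.insert (PySem.List.pyGetD L (opening.length : Int) "") (PySem.List.pyGetD opening 0 "")
      else cd := by
  have hn1 : 1 ≤ opening.length := List.length_pos_iff.mpr hop
  have hstep : ∀ (c : PySem.Dict String String) (i : Int), 1 ≤ i → i < (L.length : Int) + 1 →
      i ≠ (opening.length : Int) →
      (if opening = PySem.List.slice L none (some i) then
        if (PySem.List.slice L (some i) none).length > 0 then
          c.insert (PySem.List.pyGetD (PySem.List.slice L (some i) none) 0 "") (PySem.List.pyGetD opening 0 "")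
        else c
      else c) = c := by
    intro c i h1 h2 hne
    have h0 : (0:Int) ≤ i := by omega
    rw [PySem.List.slice_to _ h0]
    split
    · next heq =>
        exfalso
        apply hne
        have : opening.length = min i.toNat L.length := by rw [heq]; simp
        omega
    · rfl
  by_cases hB : L.length > opening.length ∧ PySem.List.slice L none (some (opening.length : Int)) = opening
  · obtain ⟨hlen, htake⟩ := hB
    rw [PySem.List.slice_to_natCast] at htake
    have hsplit : PySem.List.pyRange 1 ((L.length : Int) + 1) 1
        = PySem.List.pyRange 1 (opening.length : Int) 1
          ++ ([(opening.length : Int)] ++ PySem.List.pyRange ((opening.length : Int) + 1) ((L.length : Int) + 1) 1) := by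
      rw [← PySem.List.pyRange_one_singleton (opening.length : Int),
          ← PySem.List.pyRange_one_append _ _ _ (by omega) (by omega),
          ← PySem.List.pyRange_one_append _ _ _ (by omega) (by omega)]
    rw [hsplit, List.foldl_append, List.foldl_append]
    rw [pv_foldl_id _ _ (fun c i hi => by
      obtain ⟨ha, hb⟩ := PySem.List.mem_pyRange_one.mp hi
      exact hstep c i ha (by omega) (by omega)) cd]
    rw [if_pos ⟨hlen, by rw [PySem.List.slice_to_natCast]; exact htake⟩]
    simp only [List.foldl_cons, List.foldl_nil]
    rw [PySem.List.slice_to_natCast, PySem.List.slice_from_natCast, htake]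
    rw [if_pos rfl, if_pos (by simp; omega)]
    have hkey : PySem.List.pyGetD (List.drop opening.length L) 0 "" = PySem.List.pyGetD L (opening.length : Int) "" := by
      rw [show ((0:Int)) = ((0:Nat):Int) by rfl, PySem.List.pyGetD_natCast, PySem.List.pyGetD_natCast]
      simp [List.getD, List.getElem?_drop]
    rw [hkey]
    exact pv_foldl_id _ _ (fun c i hi => by
      obtain ⟨ha, hb⟩ := PySem.List.mem_pyRange_one.mp hi
      exact hstep c i (by omega) (by omega) (by omega)) _
  · rw [if_neg hB]
    refine pv_foldl_id _ _ (fun c i hi => ?_) cd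
    obtain ⟨ha, hb⟩ := PySem.List.mem_pyRange_one.mp hi
    by_cases hin : i = (opening.length : Int)
    · subst hin
      rw [PySem.List.slice_to_natCast]
      by_cases heq : opening = List.take opening.length L
      · rw [if_pos heq, PySem.List.slice_from_natCast]
        have hle : ¬ (L.length > opening.length) := by
          intro hgt
          exact hB ⟨hgt, by rw [PySem.List.slice_to_natCast]; exact heq.symm⟩
        rw [if_neg (by simp; omega)]
      · rw [if_neg heq]
    · exact hstep c i ha hb hin

-- A's List-String split of a string s is the String.ofList image of pvSp s.toList
theorem pv_splitA_eq (s : String) : (PySem.Str.split? s " ").getD [] = (pvSp s.toList).map String.ofList := by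
  rw [PySem.Str.split?]
  have : PySem.Chars.split? s.toList " ".toList = some (PySem.Chars.splitOn s.toList " ".toList) := by
    simp [PySem.Chars.split?]
  rw [this]
  simp only [Option.map_some, Option.getD_some]
  rw [show " ".toList = [' '] from rfl, pv_splitOn_eq]

-- ===== VERDICT (by name: the statement is the Claim_ definition above) =====
theorem accept_spec : Claim_equal_accept := by
  intro opening_book board_state _
  unfold Spec_accept accept accept_alt
  simp only
  rw [List.foldl_ext _ _ _ (fun cd LR _ => pv_inner_eq _ _ (by
    rw [pv_splitA_eq]; simp [pvSp_ne_nil] ) cd)]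
  rw [List.foldl_filterMap]
  rw [List.foldl_ext _ _ _ (fun cd kv _ => ?_)]
  have hb := pv_splitA_eq board_state
  have hk := pv_splitA_eq kv.1
  rw [hb, hk]
  by_cases hpre : (board_state.toList ++ [' ']) <+: kv.1.toList
  · obtain ⟨rest, hrest⟩ := hpre
    have hkeq : kv.1.toList = board_state.toList ++ ' ' :: rest := by rw [← hrest]; simp
    obtain ⟨hlen, htake⟩ := (pv_cond_iff board_state.toList kv.1.toList).mpr ⟨rest, hrest⟩
    rw [if_pos ⟨by simpa using hlen, by
      rw [PySem.List.slice_to_natCast]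
      simp only [List.length_map]
      rw [← List.map_take, htake]⟩]
    rw [if_pos (by rw [PySem.Chars.startswith_iff]; exact ⟨rest, hrest⟩)]
    have hdrop : kv.1.toList.drop (board_state.toList ++ [' ']).length = rest := by
      rw [hkeq,
          show board_state.toList ++ ' ' :: rest = (board_state.toList ++ [' ']) ++ rest from by simp,
          List.drop_left]
    have hsplit : pvSp kv.1.toList = pvSp board_state.toList ++ pvSp rest := by
      rw [hkeq, pvSp_append]
    simp only
    congr 1
    · -- key component
      rw [show ((((pvSp board_state.toList).map String.ofList).length : Nat) : Int) = (((pvSp board_state.toList).length : Nat) : Int) from by simp]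
      rw [PySem.List.pyGetD_natCast]
      rw [hdrop, pv_splitOn_eq]
      rw [show ((0:Int)) = ((0:Nat):Int) from rfl, PySem.List.pyGetD_natCast]
      rw [hsplit]
      cases h : pvSp rest with
      | nil => exact absurd h (pvSp_ne_nil rest)
      | cons a t =>
          simp [List.getD]
    · -- value component
      rw [pv_splitOn_eq]
      rw [show ((0:Int)) = ((0:Nat):Int) from rfl, PySem.List.pyGetD_natCast, PySem.List.pyGetD_natCast]
      cases h : pvSp board_state.toList with
      | nil => exact absurd h (pvSp_ne_nil board_state.toList)
      | cons a t => simp [List.getD]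
  · rw [if_neg (by
      rintro ⟨hlen, htake⟩
      apply hpre
      apply (pv_cond_iff board_state.toList kv.1.toList).mp
      refine ⟨by simpa using hlen, ?_⟩
      rw [PySem.List.slice_to_natCast] at htake
      simp only [List.length_map] at htake
      rw [← List.map_take] at htake
      exact List.map_injective_iff.mpr (fun a b h => String.ofList_inj.mp h) htake)]
    rw [if_neg (by rw [PySem.Chars.startswith_iff]; exact hpre)]
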